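-- pv_equiv track=rewrite | github.com/Gromak123/ssrfisher | ssrfisher.py | merge_headers
-- ===== SOURCE A (Python) =====
-- def merge_headers(base: list[tuple[str, str]], override: list[tuple[str, str]]) -> list[tuple[str, str]]:
--     """
--     Merge headers case-insensitively, letting 'override' win.
--     Keeps a stable order: base first, then any new override keys.
--     """
--     store: dict[str, tuple[str, str]] = {}
--     order: list[str] = []
--
--     def put(k: str, v: str) -> None:
--         lk = k.lower()
--         if lk not in store:
--             order.append(lk)
--         store[lk] = (k, v)
--
--     for k, v in base:
--         put(k, v)
--     for k, v in override:
--         put(k, v)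
--
--     return [store[lk] for lk in order]
-- ===== SOURCE B (Python) =====
-- def merge_headers(base: list[tuple[str, str]], override: list[tuple[str, str]]) -> list[tuple[str, str]]:
--     """Merge headers case-insensitively, override wins, stable order.
--
--     Dict-free: walk base+override left to right, emitting each lowercase key
--     the first time it appears; its surviving (casing, value) pair is the last
--     write to that key, found by scanning the reversed combined list.
--     """
--     items = base + override
--     rev = items[::-1]
--     out: list[tuple[str, str]] = []
--     seen: set[str] = set()
--     for k, _ in items:
--         lk = k.lower()
--         if lk not in seen:
--             seen.add(lk)
--             # always found: lk comes from items itself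
--             out.append(next(kv for kv in rev if kv[0].lower() == lk))
--     return out
-- ===== Notes on version B (the rewrite author's own statement) =====
-- stated objective: alternative
-- what changed: Replaces the dict+order-list with a dict-free two-direction scan: lowered keys are deduplicated left-to-right with a set and each emitted entry is the last write to that key, located by scanning the reversed base+override list.
import Mathlib
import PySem

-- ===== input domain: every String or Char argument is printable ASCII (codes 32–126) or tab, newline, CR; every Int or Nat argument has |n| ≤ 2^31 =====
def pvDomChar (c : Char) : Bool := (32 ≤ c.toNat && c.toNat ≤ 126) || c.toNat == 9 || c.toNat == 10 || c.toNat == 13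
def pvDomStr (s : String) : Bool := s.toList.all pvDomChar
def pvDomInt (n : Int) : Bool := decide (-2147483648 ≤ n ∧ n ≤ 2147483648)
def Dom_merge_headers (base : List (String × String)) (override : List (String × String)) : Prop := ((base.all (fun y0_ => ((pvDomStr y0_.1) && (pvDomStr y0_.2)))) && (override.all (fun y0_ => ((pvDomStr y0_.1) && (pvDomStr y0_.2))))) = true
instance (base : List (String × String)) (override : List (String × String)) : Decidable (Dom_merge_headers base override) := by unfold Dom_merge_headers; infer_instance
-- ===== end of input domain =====

-- B is dict-free: lowered keys are deduplicated left-to-right with a set, and each emitted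
-- entry is the last write to that key, found by scanning the reversed combined list. Objective: alternative.

-- ===== PORT A =====
-- put(k, v): append lk to order if fresh, then store[lk] = (k, v)
def mhPut (st : PySem.Dict String (String × String) × List String) (kv : String × String) :
    PySem.Dict String (String × String) × List String :=
  let lk := PySem.Str.lower kv.1
  let order := if st.1.contains lk then st.2 else st.2 ++ [lk]
  (st.1.insert lk (kv.1, kv.2), order)

def merge_headers (base : List (String × String)) (override : List (String × String)) : List (String × String) :=
  let st0 := base.foldl mhPut (PySem.Dict.empty, [])
  let st := override.foldl mhPut st0
  -- store[lk] for lk in order; every lk in order is a key, so the default is never read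
  st.2.map (fun lk => (st.1.get? lk).getD ("", ""))

-- ===== PORT B =====
def merge_headers_alt (base : List (String × String)) (override : List (String × String)) : List (String × String) :=
  let items := base ++ override
  let rev := items.reverse           -- items[::-1]
  let st := items.foldl
    (fun (st : PySem.Set String × List (String × String)) kv =>
      let lk := PySem.Str.lower kv.1
      if PySem.Set.contains st.1 lk then st
      else (PySem.Set.add st.1 lk,
            -- next(kv for kv in rev if kv[0].lower() == lk); always found, the default is never read
            st.2 ++ [(rev.find? (fun p => PySem.Str.lower p.1 == lk)).getD ("", "")]))
    (PySem.Set.empty, [])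
  st.2

-- ===== PRECONDITION & SPEC =====
def Spec_merge_headers (base : List (String × String)) (override : List (String × String)) (out : List (String × String)) : Prop := out = merge_headers_alt base override
instance (base : List (String × String)) (override : List (String × String)) (out : List (String × String)) : Decidable (Spec_merge_headers base override out) := by unfold Spec_merge_headers; infer_instance

-- ===== CLAIM =====
def Claim_equal_merge_headers : Prop := ∀ (base : List (String × String)) (override : List (String × String)), Dom_merge_headers base override → Spec_merge_headers base override (merge_headers base override)

-- ===== LEMMAS AND PROOFS =====

-- A's order list is the key list of its store, and its store is the plain insert-fold.
theorem mhPut_foldl_invariant (l : List (String × String))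
    (d : PySem.Dict String (String × String)) (ord : List String)
    (h : ord = d.keys) :
    l.foldl mhPut (d, ord) =
      (l.foldl (fun d kv => d.insert (PySem.Str.lower kv.1) (kv.1, kv.2)) d,
       (l.foldl (fun d kv => d.insert (PySem.Str.lower kv.1) (kv.1, kv.2)) d).keys) := by
  induction l generalizing d ord with
  | nil => simp [h]
  | cons kv t ih =>
    simp only [List.foldl_cons]
    apply ih
    by_cases hc : d.contains (PySem.Str.lower kv.1) = true
    · simp only [hc, if_true]
      rw [h]
      exact (PySem.Dict.keys_insert_of_contains _ _ hc).symm
    · simp only [Bool.not_eq_true] at hc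
      simp only [hc, Bool.false_eq_true, if_false]
      rw [h]
      exact (PySem.Dict.keys_insert_of_not_contains _ _ hc).symm

-- The insert-fold's lookup is the LAST write: first match in the reversed list.
theorem get?_foldl_insert_eq_find?_reverse (l : List (String × String)) (lk : String) :
    (l.foldl (fun d kv => d.insert (PySem.Str.lower kv.1) (kv.1, kv.2)) PySem.Dict.empty).get? lk
      = l.reverse.find? (fun p => PySem.Str.lower p.1 == lk) := by
  induction l using List.reverseRecOn with
  | nil => simp [PySem.Dict.get?_empty]
  | append_singleton t x ih =>
    rw [List.foldl_append]
    simp only [List.foldl_cons, List.foldl_nil, List.reverse_append, List.reverse_cons,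
      List.reverse_nil, List.nil_append, List.cons_append, List.find?_cons]
    rw [PySem.Dict.get?_insert]
    by_cases hx : lk = PySem.Str.lower x.1
    · simp [hx]
    · have : (PySem.Str.lower x.1 == lk) = false := by
        simp; exact fun h => hx h.symm
      simp [hx, this, ih]

-- B's fold, started in sync with a dict d, produces d's final key list mapped through g.
theorem alt_foldl_invariant (g : String → String × String)
    (l : List (String × String)) (d : PySem.Dict String (String × String))
    (s : PySem.Set String) (acc : List (String × String))
    (hs : s = d.keys) (hacc : acc = d.keys.map g) :
    l.foldl
      (fun (st : PySem.Set String × List (String × String)) kv =>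
        let lk := PySem.Str.lower kv.1
        if PySem.Set.contains st.1 lk then st
        else (PySem.Set.add st.1 lk, st.2 ++ [g lk])) (s, acc)
      = (((l.foldl (fun d kv => d.insert (PySem.Str.lower kv.1) (kv.1, kv.2)) d).keys : PySem.Set String),
         (l.foldl (fun d kv => d.insert (PySem.Str.lower kv.1) (kv.1, kv.2)) d).keys.map g) := by
  induction l generalizing d s acc with
  | nil => simp [hs, hacc]
  | cons kv t ih =>
    have hmem : PySem.Set.contains s (PySem.Str.lower kv.1) = d.contains (PySem.Str.lower kv.1) := by
      subst hs
      rw [Bool.eq_iff_iff]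
      simp [PySem.Set.contains, PySem.Dict.contains_iff_mem_keys]
    simp only [List.foldl_cons]
    rw [hmem]
    by_cases hc : d.contains (PySem.Str.lower kv.1) = true
    · simp only [hc, if_true]
      apply ih
      · rw [hs, PySem.Dict.keys_insert_of_contains _ _ hc]
      · rw [hacc, PySem.Dict.keys_insert_of_contains _ _ hc]
    · simp only [Bool.not_eq_true] at hc
      simp only [hc, Bool.false_eq_true, if_false]
      apply ih
      · rw [PySem.Dict.keys_insert_of_not_contains _ _ hc, PySem.Set.add, hmem, hc, hs]
        simp
      · rw [PySem.Dict.keys_insert_of_not_contains _ _ hc, hacc, List.map_append, List.map_cons,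
          List.map_nil]

-- ===== VERDICT =====
theorem merge_headers_spec : Claim_equal_merge_headers := by
  intro base override _
  unfold Spec_merge_headers merge_headers merge_headers_alt
  dsimp only
  have key := mhPut_foldl_invariant (base ++ override) PySem.Dict.empty []
    (by simp [PySem.Dict.keys_empty])
  rw [List.foldl_append] at key
  rw [key]
  dsimp only
  rw [alt_foldl_invariant
      (fun lk => ((base ++ override).reverse.find? (fun p => PySem.Str.lower p.1 == lk)).getD ("", ""))
      (base ++ override) PySem.Dict.empty PySem.Set.empty []
      (by simp [PySem.Set.empty, PySem.Dict.keys_empty])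
      (by simp [PySem.Dict.keys_empty])]
  dsimp only
  apply List.map_congr_left
  intro lk _
  rw [get?_foldl_insert_eq_find?_reverse]
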